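-- pv_equiv track=rewrite | github.com/gauravdhiman/a1-voice-agent-platform | shared/voice_agents/tools/base/registry_livekit.py | _extract_before_first_section
-- ===== SOURCE A (Python) =====
-- def _extract_before_first_section(docstring: str) -> str:
--     """
--     Extract text before the first section header (Description, Instructions, Args, etc.).
--
--     This is a fallback method for backward compatibility with old docstrings that
--     don't have explicit Description: section.
--
--     Args:
--         docstring: Full docstring from function
--
--     Returns:
--         Text before first section header
--     """
--     if not docstring:
--         return ""
--
--     lines = docstring.split("\n")
--     description_lines = []
--
--     for line in lines:
--         stripped_line = line.strip()
--
--         # Check for any section header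
--         if stripped_line.lower().startswith(
--             (
--                 "description:",
--                 "instructions:",
--                 "args:",
--                 "returns:",
--                 "raises:",
--                 "note:",
--                 "example:",
--             )
--         ):
--             break
--
--         description_lines.append(line)
--
--     # Join lines and strip
--     return "\n".join(description_lines).strip()
-- ===== SOURCE B (Python) =====
-- _HEADERS = ("description:", "instructions:", "args:", "returns:",
--             "raises:", "note:", "example:")
--
--
-- def _extract_before_first_section(docstring: str) -> str:
--     # Single scan over the raw string: keep a cut position at the current
--     # line start; slice once when the first section header is found.
--     if not docstring:
--         return ""
--     pos = 0
--     while True: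
--         lead = docstring[pos:].lstrip(" \t\r")[:13].lower()
--         if lead.startswith(_HEADERS):
--             return docstring[:pos].strip()
--         nl = docstring.find("\n", pos)
--         if nl == -1:
--             return docstring.strip()
--         pos = nl + 1
-- ===== Notes on version B (the rewrite author's own statement) =====
-- stated objective: alternative
-- what changed: A splits the docstring into a list of lines, loops appending them to an accumulator until a header line, and joins them back; B makes a single scan over the raw string, tracking only the current line-start offset and slicing the string once when the first header (or the end) is found.
import Mathlib
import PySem

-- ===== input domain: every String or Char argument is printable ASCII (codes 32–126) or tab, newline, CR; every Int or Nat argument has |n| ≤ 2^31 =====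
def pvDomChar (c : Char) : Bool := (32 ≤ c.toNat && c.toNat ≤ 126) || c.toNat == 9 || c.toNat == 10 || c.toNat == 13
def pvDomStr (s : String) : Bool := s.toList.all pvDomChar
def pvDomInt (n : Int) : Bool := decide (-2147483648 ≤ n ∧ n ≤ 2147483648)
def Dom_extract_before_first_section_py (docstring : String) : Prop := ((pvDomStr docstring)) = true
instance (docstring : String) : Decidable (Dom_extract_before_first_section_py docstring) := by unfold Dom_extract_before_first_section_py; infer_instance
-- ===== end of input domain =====

-- B replaces A's split-into-lines/accumulate/join pass by a single scan over the raw
-- string that tracks the current line-start position and slices once (alternative).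

-- ===== PORT A =====
-- the seven section-header prefixes (the tuple literal both Pythons carry)
def pvHeaders : List (List Char) :=
  ["description:".toList, "instructions:".toList, "args:".toList,
   "returns:".toList, "raises:".toList, "note:".toList, "example:".toList]

-- stripped_line.lower().startswith((...)) — startswith on a tuple is an any
def aIsHeader (line : List Char) : Bool :=
  let t := PySem.Chars.lower (PySem.Chars.strip line)
  pvHeaders.any (fun h => PySem.Chars.startswith t h)

-- the for-loop with break, accumulating description_lines
def aLoop : List (List Char) → List (List Char) → List (List Char)
  | [], acc => acc
  | l :: ls, acc => if aIsHeader l then acc else aLoop ls (acc ++ [l])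

def extract_before_first_section_py (docstring : String) : String :=
  if docstring.toList = [] then ""
  else
    let lines := PySem.Chars.splitOn docstring.toList ['\n']
    String.mk (PySem.Chars.strip (PySem.Chars.join ['\n'] (aLoop lines [])))

-- ===== PORT B =====
-- the lstrip(" \t\r") of Source B
def bSkip : List Char → List Char
  | [] => []
  | c :: cs => if c == ' ' || c == '\t' || c == '\r' then bSkip cs else c :: cs

-- docstring.find("\n", pos): splits the remainder at the first newline, none = -1
def bFindNl : List Char → Option (List Char × List Char)
  | [] => none
  | c :: cs =>
    if c == '\n' then some ([], cs)
    else
      match bFindNl cs with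
      | none => none
      | some (p, q) => some (c :: p, q)

-- lead = docstring[pos:].lstrip(" \t\r")[:13].lower(); lead.startswith(_HEADERS)
def bHeaderTest (rest : List Char) : Bool :=
  let lead := PySem.Chars.lower ((bSkip rest).take 13)
  pvHeaders.any (fun h => PySem.Chars.startswith lead h)

theorem bFindNl_length {rest pre post : List Char}
    (h : bFindNl rest = some (pre, post)) : post.length < rest.length := by
  induction rest generalizing pre post with
  | nil => simp [bFindNl] at h
  | cons c cs ih =>
    by_cases hc : (c == '\n') = true
    · simp [bFindNl, hc] at h
      obtain ⟨h1, h2⟩ := h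
      subst h2
      simp
    · simp only [bFindNl, hc, Bool.false_eq_true, if_false] at h
      cases hf : bFindNl cs with
      | none => rw [hf] at h; simp at h
      | some pq =>
        rw [hf] at h
        cases pq with
        | mk p q =>
          simp at h
          have := ih (pre := p) (post := q) hf
          obtain ⟨h1, h2⟩ := h
          subst h2
          simp
          omega

-- the while True loop; done = docstring[:pos], rest = docstring[pos:]
def bLoop (done rest : List Char) : List Char :=
  if bHeaderTest rest then PySem.Chars.strip done
  else
    match hf : bFindNl rest with
    | none => PySem.Chars.strip (done ++ rest)
    | some (pre, post) => bLoop (done ++ pre ++ ['\n']) post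
termination_by rest.length
decreasing_by exact bFindNl_length hf

def extract_before_first_section_py_alt (docstring : String) : String :=
  if docstring.toList = [] then "" else String.mk (bLoop [] docstring.toList)

-- ===== PRECONDITION & SPEC =====
def Spec_extract_before_first_section_py (docstring : String) (out : String) : Prop := out = extract_before_first_section_py_alt docstring
instance (docstring : String) (out : String) : Decidable (Spec_extract_before_first_section_py docstring out) := by unfold Spec_extract_before_first_section_py; infer_instance

-- ===== CLAIM (what is proved, stated in full; the proofs are below) =====
def Claim_equal_extract_before_first_section_py : Prop := ∀ (docstring : String), Dom_extract_before_first_section_py docstring → Spec_extract_before_first_section_py docstring (extract_before_first_section_py docstring)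

-- ===== LEMMAS AND PROOFS =====

-- reference split of a string into its '\n'-separated lines
def linesOf : List Char → List (List Char)
  | [] => [[]]
  | c :: cs => if c = '\n' then [] :: linesOf cs else (linesOf cs).modifyHead (c :: ·)

theorem linesOf_ne_nil (s : List Char) : linesOf s ≠ [] := by
  induction s with
  | nil => simp [linesOf]
  | cons c cs ih =>
    rw [linesOf]
    split
    · simp
    · cases h : linesOf cs with
      | nil => exact absurd h ih
      | cons a t => simp [List.modifyHead]

theorem splitOn_go_spec (fuel : Nat) :
    ∀ (l cur : List Char) (acc : List (List Char)), l.length < fuel →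
    PySem.Chars.splitOn.go ['\n'] fuel l cur acc
      = acc.reverse ++ (linesOf l).modifyHead (cur.reverse ++ ·) := by
  induction fuel with
  | zero => intro l cur acc h; omega
  | succ n ih =>
    intro l cur acc h
    cases l with
    | nil =>
      rw [PySem.Chars.splitOn.go]
      · simp [linesOf, List.modifyHead]
      · intro hz; omega
    | cons c rest =>
      rw [PySem.Chars.splitOn.go]
      by_cases hc : c = '\n'
      · subst hc
        rw [if_pos (by simp [List.isPrefixOf])]
        rw [ih _ _ _ (by simp at h ⊢; omega)]
        rw [linesOf, if_pos rfl]
        cases hl : linesOf rest with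
        | nil => exact absurd hl (linesOf_ne_nil rest)
        | cons a t => simp [List.modifyHead, hl]
      · rw [if_neg (by simp [List.isPrefixOf]; exact fun e => hc e.symm)]
        rw [ih _ _ _ (by simp at h ⊢; omega)]
        rw [linesOf, if_neg hc]
        cases hl : linesOf rest with
        | nil => exact absurd hl (linesOf_ne_nil rest)
        | cons a t => simp [List.modifyHead]

theorem splitOn_eq_linesOf (s : List Char) :
    PySem.Chars.splitOn s ['\n'] = linesOf s := by
  rw [PySem.Chars.splitOn, splitOn_go_spec (s.length + 1) s [] [] (by omega)]
  cases hl : linesOf s with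
  | nil => exact absurd hl (linesOf_ne_nil s)
  | cons a t => simp [List.modifyHead]

theorem aLoop_eq (ls : List (List Char)) :
    ∀ acc, aLoop ls acc = acc ++ ls.takeWhile (fun l => !aIsHeader l) := by
  induction ls with
  | nil => simp [aLoop]
  | cons l t ih =>
    intro acc
    by_cases h : aIsHeader l = true <;> simp [aLoop, h, ih]

theorem char_eq_of_toNat_eq {c d : Char} (h : c.toNat = d.toNat) : c = d := by
  cases c; cases d
  simp only [Char.toNat] at h
  congr 1
  exact UInt32.toNat_inj.mp h

theorem isspace_eq_bws {c : Char} (hd : pvDomChar c = true) (hne : c ≠ '\n') :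
    PySem.Chars.isspace c = (c == ' ' || c == '\t' || c == '\r') := by
  by_cases h1 : c = ' '; · subst h1; decide
  by_cases h2 : c = '\t'; · subst h2; decide
  by_cases h3 : c = '\r'; · subst h3; decide
  have e1 : c.toNat ≠ 32 := fun h => h1 (char_eq_of_toNat_eq h)
  have e2 : c.toNat ≠ 9 := fun h => h2 (char_eq_of_toNat_eq h)
  have e3 : c.toNat ≠ 13 := fun h => h3 (char_eq_of_toNat_eq h)
  have e4 : c.toNat ≠ 10 := fun h => hne (char_eq_of_toNat_eq h)
  simp only [pvDomChar, Bool.or_eq_true, Bool.and_eq_true, decide_eq_true_eq, beq_iff_eq] at hd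
  have hf : PySem.Chars.isspace c = false := by
    unfold PySem.Chars.isspace
    simp only [Bool.or_eq_false_iff, Bool.and_eq_false_iff, decide_eq_false_iff_not]
    omega
  rw [hf]
  simp [h1, h2, h3]

theorem isspace_toNat {c : Char} (h : PySem.Chars.isspace c = true) :
    c.toNat = 32 ∨ (9 ≤ c.toNat ∧ c.toNat ≤ 13) ∨ (28 ≤ c.toNat ∧ c.toNat ≤ 31) ∨ 133 ≤ c.toNat := by
  unfold PySem.Chars.isspace at h
  simp only [Bool.or_eq_true, Bool.and_eq_true, decide_eq_true_eq] at h
  omega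

theorem lowerChar_of_isspace {c : Char} (h : PySem.Chars.isspace c = true) :
    PySem.Chars.lowerChar c = c := by
  have ht := isspace_toNat h
  rw [PySem.Chars.lowerChar, if_neg ?_]
  rw [show PySem.Chars.isupper c = false from ?_]
  · simp
  · unfold PySem.Chars.isupper
    simp only [Bool.and_eq_false_iff, decide_eq_false_iff_not, Char.le_def,
      UInt32.le_iff_toNat_le]
    unfold Char.toNat at ht
    rw [show ('A').val.toNat = 65 from rfl, show ('Z').val.toNat = 90 from rfl]
    omega

theorem dropWhile_congr_mem {p q : Char → Bool} {l : List Char}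
    (h : ∀ x ∈ l, p x = q x) : l.dropWhile p = l.dropWhile q := by
  induction l with
  | nil => rfl
  | cons a t ih => simp only [List.dropWhile_cons, h a (by simp)]; split <;> simp_all

theorem strip_append_newline (x : List Char) :
    PySem.Chars.strip (x ++ ['\n']) = PySem.Chars.strip x := by
  unfold PySem.Chars.strip PySem.Chars.lstrip PySem.Chars.rstrip
  rw [List.dropWhile_append]
  by_cases he : (List.dropWhile PySem.Chars.isspace x).isEmpty
  · rw [if_pos he]
    rw [List.isEmpty_iff.mp he]
    rfl
  · rw [if_neg he]
    rw [List.reverse_append]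
    simp only [List.reverse_cons, List.reverse_nil, List.nil_append, List.singleton_append,
      List.dropWhile_cons]
    rw [if_pos (by decide : PySem.Chars.isspace '\n' = true)]

-- any header prefix is ≤ 13 chars, nonempty, and contains no whitespace and no newline
theorem pvHeaders_facts_bool : (pvHeaders.all (fun h => !h.isEmpty && decide (h.length ≤ 13)
    && h.all (fun x => !PySem.Chars.isspace x && x != '\n'))) = true := by decide

theorem pvHeaders_facts : ∀ h ∈ pvHeaders, h ≠ [] ∧ h.length ≤ 13 ∧
    ∀ x ∈ h, PySem.Chars.isspace x = false ∧ x ≠ '\n' := by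
  intro h hm
  have hb := List.all_eq_true.mp pvHeaders_facts_bool h hm
  simp only [Bool.and_eq_true, Bool.not_eq_true', decide_eq_true_eq, List.all_eq_true,
    bne_iff_ne, List.isEmpty_eq_false_iff] at hb
  obtain ⟨⟨h1, h2⟩, h3⟩ := hb
  exact ⟨h1, h2, h3⟩

theorem bSkip_eq_dropWhile (l : List Char) :
    bSkip l = l.dropWhile (fun c => c == ' ' || c == '\t' || c == '\r') := by
  induction l with
  | nil => rfl
  | cons c cs ih => simp only [bSkip, List.dropWhile_cons]; split <;> simp_all

theorem bFindNl_none {rest : List Char} (h : bFindNl rest = none) : '\n' ∉ rest := by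
  induction rest with
  | nil => simp
  | cons c cs ih =>
    by_cases hc : (c == '\n') = true
    · simp [bFindNl, hc] at h
    · simp only [bFindNl, hc, Bool.false_eq_true, if_false] at h
      cases hf : bFindNl cs with
      | none =>
        simp only [beq_iff_eq] at hc
        simp [Ne.symm hc, ih hf]
      | some pq => rw [hf] at h; cases pq; simp at h

theorem bFindNl_some {rest pre post : List Char}
    (h : bFindNl rest = some (pre, post)) :
    rest = pre ++ '\n' :: post ∧ '\n' ∉ pre := by
  induction rest generalizing pre post with
  | nil => simp [bFindNl] at h
  | cons c cs ih =>
    by_cases hc : (c == '\n') = true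
    · simp only [beq_iff_eq] at hc
      subst hc
      simp [bFindNl] at h
      obtain ⟨h1, h2⟩ := h
      subst h1
      subst h2
      simp
    · simp only [bFindNl, hc, Bool.false_eq_true, if_false] at h
      cases hf : bFindNl cs with
      | none => rw [hf] at h; simp at h
      | some pq =>
        rw [hf] at h
        cases pq with
        | mk p q =>
          simp at h
          obtain ⟨h1, h2⟩ := h
          obtain ⟨e1, e2⟩ := ih hf
          subst h2
          simp only [beq_iff_eq] at hc
          constructor
          · rw [← h1]; simp [e1]
          · rw [← h1]; simp [Ne.symm hc, e2]

theorem linesOf_no_nl {rest : List Char} (h : '\n' ∉ rest) : linesOf rest = [rest] := by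
  induction rest with
  | nil => rfl
  | cons c cs ih =>
    simp only [List.mem_cons, not_or] at h
    rw [linesOf, if_neg (fun hh => h.1 hh.symm), ih h.2]
    simp [List.modifyHead]

theorem linesOf_append {pre post : List Char} (h : '\n' ∉ pre) :
    linesOf (pre ++ '\n' :: post) = pre :: linesOf post := by
  induction pre with
  | nil => simp [linesOf]
  | cons c cs ih =>
    simp only [List.mem_cons, not_or] at h
    rw [List.cons_append, linesOf, if_neg (fun hh => h.1 hh.symm), ih h.2]
    simp [List.modifyHead]

-- the header test of B at a line start agrees with A's per-line test
theorem headerTest_split (line tail : List Char)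
    (hdom : ∀ c ∈ line, pvDomChar c = true) (hnl : '\n' ∉ line)
    (htail : tail = [] ∨ ∃ t, tail = '\n' :: t) :
    bHeaderTest (line ++ tail) = aIsHeader line := by
  simp only [bHeaderTest, aIsHeader]
  apply PySem.List.any_congr_mem
  intro h hmem
  obtain ⟨hne, hlen, hchars⟩ := pvHeaders_facts h hmem
  have hdw : List.dropWhile PySem.Chars.isspace line
      = List.dropWhile (fun c => c == ' ' || c == '\t' || c == '\r') line :=
    dropWhile_congr_mem (fun c hc => isspace_eq_bws (hdom c hc) (fun e => hnl (e ▸ hc)))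
  rw [bSkip_eq_dropWhile, List.dropWhile_append]
  by_cases hme : (List.dropWhile (fun c : Char => c == ' ' || c == '\t' || c == '\r') line).isEmpty
  · rw [if_pos hme]
    have hstrip : PySem.Chars.strip line = [] := by
      unfold PySem.Chars.strip PySem.Chars.lstrip
      rw [hdw, List.isEmpty_iff.mp hme]
      rfl
    rw [hstrip]
    rcases htail with rfl | ⟨t, rfl⟩
    · rfl
    · rw [show List.dropWhile (fun c : Char => c == ' ' || c == '\t' || c == '\r') ('\n' :: t)
            = '\n' :: t from by simp]
      cases h with
      | nil => exact absurd rfl hne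
      | cons hc hrest =>
        have hcne : hc ≠ '\n' := (hchars hc (by simp)).2
        rw [show (13 : Nat) = 12 + 1 from rfl, List.take_succ_cons]
        simp only [PySem.Chars.lower, List.map_cons, List.map_nil, PySem.Chars.startswith]
        rw [show PySem.Chars.lowerChar '\n' = '\n' from rfl]
        simp [List.isPrefixOf, hcne]
  · rw [if_neg hme]
    set m := List.dropWhile (fun c : Char => c == ' ' || c == '\t' || c == '\r') line with hm
    have hstrip : PySem.Chars.strip line = PySem.Chars.rstrip m := by
      unfold PySem.Chars.strip PySem.Chars.lstrip
      rw [hdw]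
    rw [hstrip]
    -- decompose m into its rstrip and a whitespace suffix
    have hsplit : m = PySem.Chars.rstrip m ++ (List.takeWhile PySem.Chars.isspace m.reverse).reverse := by
      unfold PySem.Chars.rstrip
      conv_lhs => rw [← m.reverse_reverse,
        ← List.takeWhile_append_dropWhile (p := PySem.Chars.isspace) (l := m.reverse)]
      rw [List.reverse_append]
    set a := PySem.Chars.rstrip m with hadef
    set w := (List.takeWhile PySem.Chars.isspace m.reverse).reverse with hwdef
    have hws : ∀ x ∈ w, PySem.Chars.isspace x = true := by
      intro x hx
      rw [hwdef, List.mem_reverse] at hx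
      exact List.mem_takeWhile_imp hx
    rw [Bool.eq_iff_iff]
    simp only [PySem.Chars.startswith, List.isPrefixOf_iff_prefix]
    have hmap : PySem.Chars.lower ((m ++ tail).take 13) = (PySem.Chars.lower m ++ PySem.Chars.lower tail).take 13 := by
      simp [PySem.Chars.lower, List.map_take]
    rw [hmap, List.prefix_take_iff]
    have hlow : PySem.Chars.lower m = PySem.Chars.lower a ++ PySem.Chars.lower w := by
      rw [hsplit]; simp [PySem.Chars.lower]
    have hlena : (PySem.Chars.lower a).length = a.length := by simp [PySem.Chars.lower]
    constructor
    · rintro ⟨hpre, -⟩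
      rw [hlow, List.append_assoc] at hpre
      by_cases hl2 : h.length ≤ a.length
      · have : h <+: List.take a.length (PySem.Chars.lower a ++ (PySem.Chars.lower w ++ PySem.Chars.lower tail)) :=
          List.prefix_take_iff.mpr ⟨hpre, hl2⟩
        rwa [← hlena, List.take_left] at this
      · exfalso
        obtain ⟨t2, ht2⟩ := hpre
        have hig : (PySem.Chars.lower a ++ (PySem.Chars.lower w ++ PySem.Chars.lower tail))[a.length]? = h[a.length]? := by
          rw [← ht2]
          exact List.getElem?_append_left (by omega)
        rw [List.getElem?_append_right (by omega)] at hig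
        rw [hlena, Nat.sub_self] at hig
        -- the char right after a is whitespace or a newline, but h has no such chars
        have hh : a.length < h.length := by omega
        rw [List.getElem?_eq_getElem hh] at hig
        have hmem' : h[a.length] ∈ h := List.getElem_mem hh
        obtain ⟨hx1, hx2⟩ := hchars _ hmem'
        cases hw : w with
        | cons x w' =>
          rw [hw] at hig
          simp only [PySem.Chars.lower, List.map_cons, List.cons_append, List.getElem?_cons_zero] at hig
          have hsx : PySem.Chars.isspace x = true := hws x (by rw [hw]; simp)
          rw [lowerChar_of_isspace hsx] at hig
          rw [← Option.some_inj.mp hig] at hx1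
          exact absurd hsx (by rw [hx1]; simp)
        | nil =>
          rw [hw] at hig
          rcases htail with rfl | ⟨t3, rfl⟩
          · simp [PySem.Chars.lower] at hig
          · simp only [PySem.Chars.lower, List.map_nil, List.nil_append, List.map_cons,
              List.getElem?_cons_zero] at hig
            rw [show PySem.Chars.lowerChar '\n' = '\n' from rfl] at hig
            exact hx2 (Option.some_inj.mp hig).symm
    · intro hpre
      refine ⟨?_, hlen⟩
      rw [hlow, List.append_assoc]
      exact hpre.trans (List.prefix_append _ _)

theorem bLoop_header {done rest : List Char} (hh : bHeaderTest rest = true) :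
    bLoop done rest = PySem.Chars.strip done := by
  rw [bLoop, if_pos hh]

theorem bLoop_nlNone {done rest : List Char} (hh : bHeaderTest rest = false)
    (h : bFindNl rest = none) : bLoop done rest = PySem.Chars.strip (done ++ rest) := by
  rw [bLoop, if_neg (by simp [hh])]
  split
  · rfl
  · rename_i pre post heq
    rw [h] at heq
    cases heq

theorem bLoop_nlSome {done rest pre post : List Char} (hh : bHeaderTest rest = false)
    (h : bFindNl rest = some (pre, post)) :
    bLoop done rest = bLoop (done ++ pre ++ ['\n']) post := by
  rw [bLoop, if_neg (by simp [hh])]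
  split
  · rename_i heq
    rw [h] at heq
    cases heq
  · rename_i pre' post' heq
    rw [h] at heq
    cases heq
    rfl

theorem bLoop_eq (n : Nat) :
    ∀ (rest : List Char), rest.length ≤ n → ∀ (done : List Char),
    (∀ c ∈ rest, pvDomChar c = true) →
    bLoop done rest
      = PySem.Chars.strip (done ++
          List.intercalate ['\n'] ((linesOf rest).takeWhile (fun l => !aIsHeader l))) := by
  induction n with
  | zero =>
    intro rest hlen done hdom
    have hrest : rest = [] := List.eq_nil_of_length_eq_zero (by omega)
    subst hrest
    have hht : bHeaderTest [] = aIsHeader [] := by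
      simpa using headerTest_split [] [] (by simp) (by simp) (Or.inl rfl)
    rw [linesOf_no_nl (by simp)]
    by_cases hH : aIsHeader [] = true
    · rw [bLoop_header (by rw [hht]; exact hH)]
      rw [show List.takeWhile (fun l => !aIsHeader l) [([] : List Char)] = [] from by
        simp [hH]]
      simp [List.intercalate]
    · rw [bLoop_nlNone (by rw [hht]; simpa using hH) rfl]
      rw [show List.takeWhile (fun l => !aIsHeader l) [([] : List Char)] = [[]] from by
        simp [hH]]
      simp [List.intercalate]
  | succ n ih =>
    intro rest hlen done hdom
    cases hf : bFindNl rest with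
    | none =>
      have hnl := bFindNl_none hf
      have hht : bHeaderTest rest = aIsHeader rest := by
        simpa using headerTest_split rest [] hdom hnl (Or.inl rfl)
      rw [linesOf_no_nl hnl]
      by_cases hH : aIsHeader rest = true
      · rw [bLoop_header (by rw [hht]; exact hH)]
        rw [show List.takeWhile (fun l => !aIsHeader l) [rest] = [] from by
          simp [hH]]
        simp [List.intercalate]
      · rw [bLoop_nlNone (by rw [hht]; simpa using hH) hf]
        rw [show List.takeWhile (fun l => !aIsHeader l) [rest] = [rest] from by
          simp [hH]]
        simp [List.intercalate]
    | some pp =>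
      cases pp with
      | mk pre post =>
        obtain ⟨hrest, hpre⟩ := bFindNl_some hf
        have hlt := bFindNl_length hf
        subst hrest
        have hht : bHeaderTest (pre ++ '\n' :: post) = aIsHeader pre :=
          headerTest_split pre ('\n' :: post) (fun c hc => hdom c (by simp [hc])) hpre
            (Or.inr ⟨post, rfl⟩)
        rw [linesOf_append hpre]
        by_cases hH : aIsHeader pre = true
        · rw [bLoop_header (by rw [hht]; exact hH)]
          rw [show List.takeWhile (fun l => !aIsHeader l) (pre :: linesOf post) = [] from by
            simp [hH]]
          simp [List.intercalate]
        · rw [bLoop_nlSome (by rw [hht]; simpa using hH) hf]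
          rw [ih post (by simp at hlen hlt ⊢; omega) (done ++ pre ++ ['\n'])
            (fun c hc => hdom c (by simp [hc]))]
          rw [List.takeWhile_cons, if_pos (by simp [hH])]
          cases hT : (linesOf post).takeWhile (fun l => !aIsHeader l) with
          | nil =>
            simp only [List.intercalate, List.intersperse, List.flatten, List.append_nil]
            rw [show done ++ pre ++ ['\n'] = (done ++ pre) ++ ['\n'] from by simp,
              strip_append_newline]
            simp
          | cons a t =>
            rw [show List.intercalate ['\n'] (pre :: a :: t)
                  = pre ++ '\n' :: List.intercalate ['\n'] (a :: t) from by
                simp [List.intercalate, List.intersperse]]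
            simp [List.append_assoc]

-- ===== VERDICT (by name: the statement is the Claim_ definition above) =====
theorem extract_before_first_section_py_spec : Claim_equal_extract_before_first_section_py := by
  intro s hdom
  unfold Spec_extract_before_first_section_py
  unfold extract_before_first_section_py extract_before_first_section_py_alt
  by_cases hs : s.toList = []
  · simp [hs]
  · simp only [hs, if_false]
    have hd : ∀ c ∈ s.toList, pvDomChar c = true := by
      simpa [Dom_extract_before_first_section_py, pvDomStr, List.all_eq_true] using hdom
    rw [bLoop_eq s.toList.length s.toList le_rfl [] hd]
    rw [splitOn_eq_linesOf, aLoop_eq]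
    simp [PySem.Chars.join]
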